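-- pv_equiv track=rewrite | github.com/FiskAxel/advent_of_code_2016 | day21.py | rotateLR
-- ===== SOURCE A (Python) =====
-- def rotateLR(s, lr, n):
-- 	newS = ""
-- 	if lr == "right":
-- 		for i in range(len(s)):
-- 			newS += s[(i - n) % len(s)]
-- 	else:
-- 		for i in range(len(s)):
-- 			newS += s[(i + n) % len(s)]
-- 	return newS
-- ===== SOURCE B (Python) =====
-- def rotateLR(s, lr, n):
--     if not s:
--         return s
--     m = n % len(s)
--     if lr == "right":
--         return s[-m:] + s[:-m]
--     return s[m:] + s[:m]
-- ===== Notes on version B (the rewrite author's own statement) =====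
-- stated objective: faster
-- what changed: Replaces the character-by-character modular-index concatenation loop with a closed-form two-slice rotation after reducing n modulo len(s).
import Mathlib
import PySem

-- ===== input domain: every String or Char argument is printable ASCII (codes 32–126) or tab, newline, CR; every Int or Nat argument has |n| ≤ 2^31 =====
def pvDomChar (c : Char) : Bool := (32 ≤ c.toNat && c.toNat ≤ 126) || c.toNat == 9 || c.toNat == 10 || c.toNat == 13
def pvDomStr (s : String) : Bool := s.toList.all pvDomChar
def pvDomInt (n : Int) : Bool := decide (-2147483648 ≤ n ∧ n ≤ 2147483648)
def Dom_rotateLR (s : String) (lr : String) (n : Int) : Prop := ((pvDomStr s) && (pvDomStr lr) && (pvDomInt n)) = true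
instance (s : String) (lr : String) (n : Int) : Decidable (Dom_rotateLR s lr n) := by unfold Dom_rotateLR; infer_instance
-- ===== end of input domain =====

-- B replaces A's quadratic char-by-char modular-index concatenation loop with a closed-form two-slice rotation (faster).

-- ===== PORT A =====
def rotateLR (s : String) (lr : String) (n : Int) : String :=
  let cs := s.toList
  let L : Int := PySem.List.len cs
  if lr == "right" then
    String.ofList ((PySem.List.pyRange 0 L).foldl
      (fun acc i => acc ++ [PySem.List.pyGetD cs (PySem.Int.mod (i - n) L) ' ']) [])
  else
    String.ofList ((PySem.List.pyRange 0 L).foldl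
      (fun acc i => acc ++ [PySem.List.pyGetD cs (PySem.Int.mod (i + n) L) ' ']) [])

-- ===== PORT B =====
def rotateLR_alt (s : String) (lr : String) (n : Int) : String :=
  let cs := s.toList
  if cs.isEmpty then s
  else
    let m := PySem.Int.mod n (PySem.List.len cs)
    if lr == "right" then
      String.ofList (PySem.List.slice cs (some (-m)) none ++ PySem.List.slice cs none (some (-m)))
    else
      String.ofList (PySem.List.slice cs (some m) none ++ PySem.List.slice cs none (some m))

-- ===== PRECONDITION & SPEC =====
def Spec_rotateLR (s : String) (lr : String) (n : Int) (out : String) : Prop := out = rotateLR_alt s lr n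
instance (s : String) (lr : String) (n : Int) (out : String) : Decidable (Spec_rotateLR s lr n out) := by unfold Spec_rotateLR; infer_instance

-- ===== CLAIM (what is proved, stated in full; the proofs are below) =====
def Claim_equal_rotateLR : Prop := ∀ (s : String) (lr : String) (n : Int), Dom_rotateLR s lr n → Spec_rotateLR s lr n (rotateLR s lr n)

-- ===== LEMMAS AND PROOFS =====

-- x % L for 0 ≤ x < 2L
lemma emod_window (L x : Int) (h0 : 0 ≤ x) (hx : x < 2 * L) :
    x % L = if x < L then x else x - L := by
  split_ifs with h
  · exact Int.emod_eq_of_lt h0 h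
  · rw [← Int.sub_emod_right x L]
    exact Int.emod_eq_of_lt (by omega) (by omega)

-- (k + n) % L in terms of m = n % L
lemma mod_shift (L : Int) (hL : 0 < L) (k n : Int) (hk0 : 0 ≤ k) (hk : k < L) :
    PySem.Int.mod (k + n) L =
      if k + PySem.Int.mod n L < L then k + PySem.Int.mod n L else k + PySem.Int.mod n L - L := by
  have hm0 : 0 ≤ PySem.Int.mod n L := PySem.Int.mod_nonneg _ hL
  have hmL : PySem.Int.mod n L < L := PySem.Int.mod_lt _ hL
  simp only [PySem.Int.mod_eq_emod_of_pos hL] at *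
  have hsplit : k + n = (k + n % L) + L * (n / L) := by
    have := Int.emod_add_mul_ediv n L; omega
  rw [hsplit, Int.add_mul_emod_self_left]
  exact emod_window L _ (by omega) (by omega)

-- mod of -n from mod of n
lemma mod_neg_rel (L n : Int) (hL : 0 < L) :
    PySem.Int.mod (-n) L = if PySem.Int.mod n L = 0 then 0 else L - PySem.Int.mod n L := by
  have hm0 : 0 ≤ PySem.Int.mod n L := PySem.Int.mod_nonneg _ hL
  have hmL : PySem.Int.mod n L < L := PySem.Int.mod_lt _ hL
  simp only [PySem.Int.mod_eq_emod_of_pos hL] at *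
  have hsplit : -n = (L - n % L) + L * (-(n / L) - 1) := by
    have := Int.emod_add_mul_ediv n L; ring_nf; omega
  rw [hsplit, Int.add_mul_emod_self_left]
  split_ifs with h
  · rw [h]; simp
  · exact Int.emod_eq_of_lt (by omega) (by omega)

-- A's index loop as a map produces exactly "rotate left by (n mod L)"
lemma rot_map (cs : List Char) (h : cs ≠ []) (n : Int) :
    (PySem.List.pyRange 0 (PySem.List.len cs)).map
        (fun i => PySem.List.pyGetD cs (PySem.Int.mod (i + n) (PySem.List.len cs)) ' ')
      = cs.drop (PySem.Int.mod n (PySem.List.len cs)).toNat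
        ++ cs.take (PySem.Int.mod n (PySem.List.len cs)).toNat := by
  have hL : 0 < (cs.length : Int) := by
    have : 0 < cs.length := List.length_pos_iff.mpr h
    exact_mod_cast this
  rw [PySem.List.len_eq]
  have hm0 : 0 ≤ PySem.Int.mod n cs.length := PySem.Int.mod_nonneg _ hL
  have hmL : PySem.Int.mod n cs.length < cs.length := PySem.Int.mod_lt _ hL
  set m : Nat := (PySem.Int.mod n cs.length).toNat with hm
  have hmlt : m < cs.length := by omega
  have hmcast : (m : Int) = PySem.Int.mod n cs.length := by omega
  apply List.ext_getElem
  · simp [PySem.List.length_pyRange_one]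
    omega
  · intro k h1 h2
    have hk : k < cs.length := by
      simpa [PySem.List.length_pyRange_one] using h1
    rw [List.getElem_map, PySem.List.getElem_pyRange_one]
    rw [zero_add]
    rw [mod_shift (cs.length : Int) hL k n (by omega) (by exact_mod_cast hk)]
    rw [← hmcast]
    by_cases hc : k + m < cs.length
    · have hlt : (k : Int) + (m : Int) < (cs.length : Int) := by exact_mod_cast hc
      rw [if_pos hlt]
      rw [PySem.List.pyGetD_eq_getElem _ _ (by omega) (by omega)]
      rw [List.getElem_append_left (by simp; omega)]
      simp only [List.getElem_drop]
      congr 1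
      omega
    · have hlt : ¬ ((k : Int) + (m : Int) < (cs.length : Int)) := by exact_mod_cast hc
      rw [if_neg hlt]
      rw [PySem.List.pyGetD_eq_getElem _ _ (by omega) (by omega)]
      rw [List.getElem_append_right (by simp; omega)]
      rw [List.getElem_take]
      congr 1
      simp
      omega

-- B's two slices, for either sign form of the offset
lemma slices_left (cs : List Char) (h : cs ≠ []) (n : Int) :
    PySem.List.slice cs (some (PySem.Int.mod n (PySem.List.len cs))) none
      ++ PySem.List.slice cs none (some (PySem.Int.mod n (PySem.List.len cs)))
    = cs.drop (PySem.Int.mod n (PySem.List.len cs)).toNat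
      ++ cs.take (PySem.Int.mod n (PySem.List.len cs)).toNat := by
  have hL : 0 < (cs.length : Int) := by
    have : 0 < cs.length := List.length_pos_iff.mpr h
    exact_mod_cast this
  rw [PySem.List.len_eq]
  have hm0 : 0 ≤ PySem.Int.mod n cs.length := PySem.Int.mod_nonneg _ hL
  rw [PySem.List.slice_from _ hm0, PySem.List.slice_to _ hm0]

lemma slices_right (cs : List Char) (h : cs ≠ []) (n : Int) :
    PySem.List.slice cs (some (-(PySem.Int.mod n (PySem.List.len cs)))) none
      ++ PySem.List.slice cs none (some (-(PySem.Int.mod n (PySem.List.len cs))))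
    = cs.drop (PySem.Int.mod (-n) (PySem.List.len cs)).toNat
      ++ cs.take (PySem.Int.mod (-n) (PySem.List.len cs)).toNat := by
  have hL : 0 < (cs.length : Int) := by
    have : 0 < cs.length := List.length_pos_iff.mpr h
    exact_mod_cast this
  rw [PySem.List.len_eq]
  have hm0 : 0 ≤ PySem.Int.mod n cs.length := PySem.Int.mod_nonneg _ hL
  have hmL : PySem.Int.mod n cs.length < cs.length := PySem.Int.mod_lt _ hL
  rw [mod_neg_rel _ n hL]
  by_cases h0 : PySem.Int.mod n cs.length = 0
  · rw [h0]
    simp [PySem.List.slice_none_none, PySem.List.slice_to _ (le_refl (0:Int))]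
  · rw [if_neg h0]
    set k : Nat := (PySem.Int.mod n cs.length).toNat with hk
    have hkpos : 0 < k := by omega
    have hkle : k ≤ cs.length := by omega
    have hcast : -(PySem.Int.mod n cs.length) = -(k : Int) := by omega
    rw [hcast, PySem.List.slice_from_neg_natCast cs k hkpos,
        PySem.List.slice_to_neg_natCast cs k hkpos]
    have : ((cs.length : Int) - PySem.Int.mod n cs.length).toNat = cs.length - k := by omega
    rw [this]

-- ===== VERDICT (by name: the statement is the Claim_ definition above) =====
theorem rotateLR_spec : Claim_equal_rotateLR := by
  intro s lr n _
  unfold Spec_rotateLR rotateLR rotateLR_alt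
  simp only []
  by_cases hcs : s.toList = []
  · have hL : PySem.List.len s.toList = 0 := by rw [PySem.List.len_eq, hcs]; rfl
    have hE : s.toList.isEmpty = true := by rw [hcs]; rfl
    rw [hE]
    simp only [if_true]
    have hr : PySem.List.pyRange 0 (PySem.List.len s.toList) = [] := by
      rw [hL]; rfl
    rw [hr]
    have : s = String.ofList s.toList := String.ofList_toList.symm
    split_ifs <;> (rw [this, hcs]; rfl)
  · have hE : s.toList.isEmpty = false := by
      rw [List.isEmpty_eq_false_iff]; exact hcs
    rw [hE]
    simp only [Bool.false_eq_true, if_false]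
    by_cases hlr : lr == "right"
    · rw [if_pos hlr, if_pos hlr]
      rw [PySem.List.foldl_append_singleton_eq_map, List.nil_append]
      congr 1
      have : ∀ i : Int, i - n = i + (-n) := fun i => by ring
      simp only [this]
      rw [rot_map s.toList hcs (-n), slices_right s.toList hcs n]
    · rw [if_neg hlr, if_neg hlr]
      rw [PySem.List.foldl_append_singleton_eq_map, List.nil_append]
      congr 1
      rw [rot_map s.toList hcs n, slices_left s.toList hcs n]
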